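-- pv_equiv track=rewrite | github.com/kirishimaaaaaaaaaaaaaaaaaaaaaa/Typing-speed-test | app.py | calculate_errors
-- ===== SOURCE A (Python) =====
-- def calculate_errors(reference_text, user_input):
--     errors_count = 0
--     for char_index in range(len(reference_text)):
--         try:
--             if reference_text[char_index] != user_input[char_index]:
--                 errors_count += 1
--         except IndexError:
--             errors_count += 1
--     return errors_count
-- ===== SOURCE B (Python) =====
-- def calculate_errors(reference_text, user_input):
--     # Divide and conquer: split the reference in half and recurse on the
--     # aligned halves of the user input; single-character base case.
--     def go(r, u):
--         n = len(r)
--         if n == 0: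
--             return 0
--         if n == 1:
--             return 0 if u[:1] == r else 1
--         m = n // 2
--         return go(r[:m], u[:m]) + go(r[m:], u[m:])
--     return go(reference_text, user_input)
-- ===== Notes on version B (the rewrite author's own statement) =====
-- stated objective: alternative
-- what changed: Replaces the linear index loop with per-character try/except IndexError by a divide-and-conquer recursion that splits the reference (and the aligned slice of the user input) in half, with a one-character base case; missing characters are handled because an empty slice never equals a one-character reference.
import Mathlib
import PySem

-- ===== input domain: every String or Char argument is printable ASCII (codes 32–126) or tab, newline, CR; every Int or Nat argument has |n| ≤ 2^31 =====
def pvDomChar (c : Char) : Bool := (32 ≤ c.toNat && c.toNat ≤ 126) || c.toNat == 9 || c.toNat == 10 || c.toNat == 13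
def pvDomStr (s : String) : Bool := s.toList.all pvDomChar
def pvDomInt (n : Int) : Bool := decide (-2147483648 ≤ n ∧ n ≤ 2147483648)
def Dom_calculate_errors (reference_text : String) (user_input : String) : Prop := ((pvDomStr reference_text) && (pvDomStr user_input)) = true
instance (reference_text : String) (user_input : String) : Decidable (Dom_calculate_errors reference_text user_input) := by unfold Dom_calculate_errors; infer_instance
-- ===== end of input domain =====

-- B replaces A's index loop with per-character try/except by a divide-and-conquer
-- recursion splitting the reference in half (objective: alternative).

-- ===== PORT A =====
-- loop body: try 'reference_text[i] != user_input[i]' except IndexError: count one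
def pvStepA (r u : List Char) (errors_count : Int) (char_index : Int) : Int :=
  match PySem.List.pyGet? r char_index, PySem.List.pyGet? u char_index with
  | some c, some d => if c ≠ d then errors_count + 1 else errors_count
  | _, _ => errors_count + 1          -- IndexError caught: count an error

def calculate_errors (reference_text : String) (user_input : String) : Int :=
  (PySem.List.pyRange 0 (reference_text.toList.length : Int) 1).foldl
    (pvStepA reference_text.toList user_input.toList) 0

-- ===== PORT B =====
-- inner helper go(r, u): slices r[:m]/r[m:] with 0 ≤ m ≤ len(r) are take/drop; u[:1] is u.take 1
-- (`fuel` only bounds the recursion depth so the same computation is total; it is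
--  called with fuel = len(r) and every recursive call strictly shrinks r)
def pvGo (fuel : Nat) (r u : List Char) : Int :=
  match fuel with
  | 0 => 0
  | fuel + 1 =>
    if r.length = 0 then 0
    else if r.length = 1 then
      (if u.take 1 = r then 0 else 1)
    else
      pvGo fuel (r.take (r.length / 2)) (u.take (r.length / 2))
        + pvGo fuel (r.drop (r.length / 2)) (u.drop (r.length / 2))

def calculate_errors_alt (reference_text : String) (user_input : String) : Int :=
  pvGo reference_text.toList.length reference_text.toList user_input.toList

-- ===== PRECONDITION & SPEC =====
def Spec_calculate_errors (reference_text : String) (user_input : String) (out : Int) : Prop := out = calculate_errors_alt reference_text user_input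
instance (reference_text : String) (user_input : String) (out : Int) : Decidable (Spec_calculate_errors reference_text user_input out) := by unfold Spec_calculate_errors; infer_instance

-- ===== CLAIM (what is proved, stated in full; the proofs are below) =====
def Claim_equal_calculate_errors : Prop := ∀ (reference_text : String) (user_input : String), Dom_calculate_errors reference_text user_input → Spec_calculate_errors reference_text user_input (calculate_errors reference_text user_input)

-- ===== LEMMAS AND PROOFS =====

/-- reference spec: mismatches on the overlap plus one per missing character -/
def pvCnt : List Char → List Char → Int
  | [], _ => 0
  | _ :: r, [] => 1 + pvCnt r []
  | c :: r, d :: u => (if c ≠ d then 1 else 0) + pvCnt r u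

theorem pvCnt_nil_right (r : List Char) : pvCnt r [] = (r.length : Int) := by
  induction r with
  | nil => simp [pvCnt]
  | cons c r ih => simp only [pvCnt, ih, List.length_cons]; push_cast; ring

/-- pvCnt splits across a concatenation of the reference. -/
theorem pvCnt_append (r1 r2 u : List Char) :
    pvCnt (r1 ++ r2) u = pvCnt r1 (u.take r1.length) + pvCnt r2 (u.drop r1.length) := by
  induction r1 generalizing u with
  | nil => simp [pvCnt]
  | cons c r1 ih =>
    cases u with
    | nil => simp [pvCnt_nil_right]; ring
    | cons d u =>
      simp only [List.cons_append, pvCnt, List.length_cons, List.take_succ_cons,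
        List.drop_succ_cons, ih]
      ring

theorem pvGo_eq (fuel : Nat) : ∀ r u : List Char, r.length ≤ fuel → pvGo fuel r u = pvCnt r u := by
  induction fuel with
  | zero =>
    intro r u hn
    have : r = [] := List.length_eq_zero_iff.mp (Nat.le_zero.mp hn)
    simp [this, pvGo, pvCnt]
  | succ fuel ih =>
    intro r u hn
    rw [pvGo]
    by_cases h0 : r.length = 0
    · rw [if_pos h0]
      have : r = [] := List.length_eq_zero_iff.mp h0
      simp [this, pvCnt]
    · rw [if_neg h0]
      by_cases h1 : r.length = 1
      · rw [if_pos h1]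
        obtain ⟨c, hc⟩ := List.length_eq_one_iff.mp h1
        subst hc
        cases u with
        | nil => simp [pvCnt]
        | cons d u =>
          simp only [List.take_succ_cons, List.take_zero, pvCnt]
          by_cases hcd : d = c <;> simp [hcd, eq_comm]
      · rw [if_neg h1]
        have hsplit := pvCnt_append (r.take (r.length / 2)) (r.drop (r.length / 2)) u
        rw [List.take_append_drop] at hsplit
        have hlen : (r.take (r.length / 2)).length = r.length / 2 := by
          simp only [List.length_take]; omega
        have hdlen : (r.drop (r.length / 2)).length = r.length - r.length / 2 := by
          simp [List.length_drop]
        rw [hsplit, hlen, ih _ _ (by omega), ih _ _ (by rw [hdlen]; omega)]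

/-- peel the first index off a fold over `range (n+1)` -/
theorem pvFoldShift (f : Int → Int → Int) (n : Nat) (a : Int) :
    ((List.range (n + 1)).map Int.ofNat).foldl f a
      = ((List.range n).map Int.ofNat).foldl (fun b k => f b (k + 1)) (f a 0) := by
  rw [List.range_succ_eq_map]
  simp only [List.map_cons, List.map_map, List.foldl_cons, List.foldl_map]
  congr 1

theorem pvFoldA_eq (r u : List Char) (acc : Int) :
    ((List.range r.length).map Int.ofNat).foldl (pvStepA r u) acc
      = acc + pvCnt r u := by
  induction r generalizing u acc with
  | nil => simp [pvCnt]
  | cons c r ih =>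
    rw [List.length_cons, pvFoldShift]
    cases u with
    | nil =>
      have h0 : pvStepA (c :: r) [] acc 0 = acc + 1 := by
        simp [pvStepA, PySem.List.pyGet?, PySem.List.pyIdx?]
      have hfun :
          ((List.range r.length).map Int.ofNat).foldl
              (fun b k => pvStepA (c :: r) [] b (k + 1)) (acc + 1)
            = ((List.range r.length).map Int.ofNat).foldl (pvStepA r []) (acc + 1) := by
        simp only [List.foldl_map]
        congr 1
        funext b k
        simp [pvStepA, Int.ofNat_eq_natCast, PySem.List.pyGet?, PySem.List.pyIdx?]
      rw [h0, hfun, ih [] (acc + 1)]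
      simp [pvCnt]; ring
    | cons d u =>
      have h0 : pvStepA (c :: r) (d :: u) acc 0
          = (if c ≠ d then acc + 1 else acc) := by
        simp [pvStepA, PySem.List.pyGet?, PySem.List.pyIdx?]
      have hfun : ∀ a : Int,
          ((List.range r.length).map Int.ofNat).foldl
              (fun b k => pvStepA (c :: r) (d :: u) b (k + 1)) a
            = ((List.range r.length).map Int.ofNat).foldl (pvStepA r u) a := by
        intro a
        simp only [List.foldl_map]
        congr 1
        funext b k
        simp [pvStepA, Int.ofNat_eq_natCast, PySem.List.pyGet?_cons_succ]
      rw [h0]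
      split_ifs with hcd
      · rw [hfun, ih u (acc + 1)]
        simp [pvCnt, hcd]; ring
      · rw [hfun, ih u acc]
        simp [pvCnt, hcd]

-- ===== VERDICT (by name: the statement is the Claim_ definition above) =====
theorem calculate_errors_spec : Claim_equal_calculate_errors := by
  intro reference_text user_input _
  unfold Spec_calculate_errors calculate_errors calculate_errors_alt
  have hr : PySem.List.pyRange 0 (reference_text.toList.length : Int) 1
      = (List.range reference_text.toList.length).map Int.ofNat := by
    rw [PySem.List.pyRange_one]
    simp [Int.ofNat_eq_natCast]
  rw [hr, pvFoldA_eq, pvGo_eq reference_text.toList.length _ _ le_rfl]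
  ring
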